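-- pv_equiv track=rewrite | github.com/jbirby/DSC-Codec | scripts/dsc_common.py | find_dot_pattern
-- ===== SOURCE A (Python) =====
-- from typing import Tuple, List, Optional, Dict
--
-- def find_dot_pattern(bits: List[int]) -> int:
--     """
--     Find the bit synchronization dot pattern (200 alternating bits).
--
--     Looks for the best match with both orientations.
--
--     Returns the index where the pattern starts, or -1 if not found.
--     """
--     if len(bits) < 200:
--         return -1
--
--     best_idx = -1
--     best_score = 0
--
--     for start in range(len(bits) - 200):
--         # Count matches with both orientations
--         matches = sum(1 for i in range(200) if bits[start + i] == (i & 1))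
--         matches_inv = sum(1 for i in range(200) if bits[start + i] == (1 - (i & 1)))
--
--         # Use the best match
--         max_matches = max(matches, matches_inv)
--
--         # Keep track of the best match (should be ~200)
--         if max_matches > best_score:
--             best_score = max_matches
--             best_idx = start
--
--     # Accept if at least 75% match (150 out of 200)
--     if best_score >= 150:
--         return best_idx
--
--     return -1
-- ===== SOURCE B (Python) =====
-- def find_dot_pattern(bits):
--     """
--     Find the bit synchronization dot pattern (200 alternating bits).
--
--     Prefix-sum re-implementation: p[j] (resp. q[j]) counts positions k < j
--     where bits[k] == k & 1 (resp. bits[k] == 1 - (k & 1)); each window's two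
--     orientation scores are then O(1) prefix differences.
--     """
--     n = len(bits)
--     if n < 200:
--         return -1
--
--     p = [0]
--     q = [0]
--     for k, b in enumerate(bits):
--         p.append(p[-1] + (1 if b == (k & 1) else 0))
--         q.append(q[-1] + (1 if b == (1 - (k & 1)) else 0))
--
--     best_idx = -1
--     best_score = 0
--     for start in range(n - 200):
--         if start % 2 == 0:
--             m = p[start + 200] - p[start]
--             mi = q[start + 200] - q[start]
--         else:
--             m = q[start + 200] - q[start]
--             mi = p[start + 200] - p[start]
--         mm = m if m > mi else mi
--         if mm > best_score:
--             best_score = mm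
--             best_idx = start
--
--     return best_idx if best_score >= 150 else -1
-- ===== Notes on version B (the rewrite author's own statement) =====
-- stated objective: faster
-- what changed: Replaces the per-window 200-element rescans with two prefix-sum arrays (matches to each parity), so each window's two orientation scores are O(1) prefix differences.
import Mathlib
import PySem

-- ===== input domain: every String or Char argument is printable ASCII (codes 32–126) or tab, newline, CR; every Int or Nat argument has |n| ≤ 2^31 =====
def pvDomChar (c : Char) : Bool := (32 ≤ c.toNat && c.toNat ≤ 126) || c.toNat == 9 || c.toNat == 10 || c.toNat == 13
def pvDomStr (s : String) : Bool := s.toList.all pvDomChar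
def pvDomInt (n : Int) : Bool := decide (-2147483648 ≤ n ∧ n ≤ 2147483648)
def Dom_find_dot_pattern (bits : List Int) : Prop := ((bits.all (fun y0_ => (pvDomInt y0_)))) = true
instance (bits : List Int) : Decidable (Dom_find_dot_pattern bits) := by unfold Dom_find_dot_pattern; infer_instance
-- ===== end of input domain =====

-- B replaces A's 200-element rescan per window with two prefix-sum lists of per-parity matches (measured faster).

-- ===== PORT A =====
def find_dot_pattern (bits : List Int) : Int :=
  if bits.length < 200 then -1
  else
    let res := (PySem.List.pyRange 0 ((bits.length : Int) - 200) 1).foldl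
      (fun (st : Int × Int) start =>
        let matchcnt := ((PySem.List.pyRange 0 200 1).map
          (fun i => if PySem.List.pyGetD bits (start + i) 0 = PySem.Int.band i 1 then (1 : Int) else 0)).sum
        let matches_inv := ((PySem.List.pyRange 0 200 1).map
          (fun i => if PySem.List.pyGetD bits (start + i) 0 = 1 - PySem.Int.band i 1 then (1 : Int) else 0)).sum
        let max_matches := max matchcnt matches_inv
        if max_matches > st.2 then (start, max_matches) else st) (-1, 0)
    if res.2 ≥ 150 then res.1 else -1

-- ===== PORT B =====
def find_dot_pattern_alt (bits : List Int) : Int :=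
  if bits.length < 200 then -1
  else
    let pq := (PySem.List.enumerate bits 0).foldl
      (fun (pq : List Int × List Int) kb =>
        (pq.1 ++ [PySem.List.pyGetD pq.1 (-1) 0 + (if kb.2 = PySem.Int.band kb.1 1 then (1 : Int) else 0)],
         pq.2 ++ [PySem.List.pyGetD pq.2 (-1) 0 + (if kb.2 = 1 - PySem.Int.band kb.1 1 then (1 : Int) else 0)]))
      ([0], [0])
    let res := (PySem.List.pyRange 0 ((bits.length : Int) - 200) 1).foldl
      (fun (st : Int × Int) start =>
        let m := if PySem.Int.mod start 2 = 0
          then PySem.List.pyGetD pq.1 (start + 200) 0 - PySem.List.pyGetD pq.1 start 0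
          else PySem.List.pyGetD pq.2 (start + 200) 0 - PySem.List.pyGetD pq.2 start 0
        let mi := if PySem.Int.mod start 2 = 0
          then PySem.List.pyGetD pq.2 (start + 200) 0 - PySem.List.pyGetD pq.2 start 0
          else PySem.List.pyGetD pq.1 (start + 200) 0 - PySem.List.pyGetD pq.1 start 0
        let mm := if m > mi then m else mi
        if mm > st.2 then (start, mm) else st) (-1, 0)
    if res.2 ≥ 150 then res.1 else -1

-- ===== PRECONDITION & SPEC =====
def Spec_find_dot_pattern (bits : List Int) (out : Int) : Prop := out = find_dot_pattern_alt bits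
instance (bits : List Int) (out : Int) : Decidable (Spec_find_dot_pattern bits out) := by unfold Spec_find_dot_pattern; infer_instance

-- ===== CLAIM (what is proved, stated in full; the proofs are below) =====
def Claim_equal_find_dot_pattern : Prop := ∀ (bits : List Int), Dom_find_dot_pattern bits → Spec_find_dot_pattern bits (find_dot_pattern bits)

-- ===== LEMMAS AND PROOFS =====

-- position-parity match predicates (bits[k] == k&1 and bits[k] == 1-(k&1))
def pvP (bits : List Int) (k : Nat) : Bool := decide (bits.getD k 0 = ((k % 2 : Nat) : Int))
def pvQ (bits : List Int) (k : Nat) : Bool := decide (bits.getD k 0 = 1 - ((k % 2 : Nat) : Int))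

-- B's prefix-building loop is a pair of scanls
lemma pv_foldl_scan (l : List (Int × Int)) :
    ∀ (p0 q0 : List Int) (x y : Int),
    l.foldl (fun (pq : List Int × List Int) kb =>
        (pq.1 ++ [PySem.List.pyGetD pq.1 (-1) 0 + (if kb.2 = PySem.Int.band kb.1 1 then (1 : Int) else 0)],
         pq.2 ++ [PySem.List.pyGetD pq.2 (-1) 0 + (if kb.2 = 1 - PySem.Int.band kb.1 1 then (1 : Int) else 0)]))
      (p0 ++ [x], q0 ++ [y])
      = (p0 ++ List.scanl (fun a kb => a + (if kb.2 = PySem.Int.band kb.1 1 then (1 : Int) else 0)) x l,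
         q0 ++ List.scanl (fun a kb => a + (if kb.2 = 1 - PySem.Int.band kb.1 1 then (1 : Int) else 0)) y l) := by
  induction l with
  | nil => intro p0 q0 x y; simp
  | cons kb t ih =>
    intro p0 q0 x y
    rw [List.foldl_cons, List.scanl_cons, List.scanl_cons]
    simp only [PySem.List.pyGetD_neg_one_append_singleton]
    have h := ih (p0 ++ [x]) (q0 ++ [y]) (x + (if kb.2 = PySem.Int.band kb.1 1 then (1 : Int) else 0))
      (y + (if kb.2 = 1 - PySem.Int.band kb.1 1 then (1 : Int) else 0))
    simpa [List.append_assoc] using h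

lemma pv_build_eq (bits : List Int) :
    (PySem.List.enumerate bits 0).foldl
      (fun (pq : List Int × List Int) kb =>
        (pq.1 ++ [PySem.List.pyGetD pq.1 (-1) 0 + (if kb.2 = PySem.Int.band kb.1 1 then (1 : Int) else 0)],
         pq.2 ++ [PySem.List.pyGetD pq.2 (-1) 0 + (if kb.2 = 1 - PySem.Int.band kb.1 1 then (1 : Int) else 0)]))
      ([0], [0])
      = (List.scanl (fun a kb => a + (if kb.2 = PySem.Int.band kb.1 1 then (1 : Int) else 0)) 0 (PySem.List.enumerate bits 0),
         List.scanl (fun a kb => a + (if kb.2 = 1 - PySem.Int.band kb.1 1 then (1 : Int) else 0)) 0 (PySem.List.enumerate bits 0)) := by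
  simpa using pv_foldl_scan (PySem.List.enumerate bits 0) [] [] 0 0

-- getD of a running-total scanl is the sum over the taken prefix
lemma pv_scanl_getD (d : Int × Int → Int) (l : List (Int × Int)) :
    ∀ (x : Int) (j : Nat), j ≤ l.length →
    (List.scanl (fun a kb => a + d kb) x l).getD j 0 = x + ((l.take j).map d).sum := by
  induction l with
  | nil =>
    intro x j hj
    have hz : j = 0 := Nat.le_zero.mp hj
    subst hz; simp
  | cons kb t ih =>
    intro x j hj
    cases j with
    | zero => simp [List.scanl_cons]
    | succ j =>
      have h := ih (x + d kb) j (by simpa using hj)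
      rw [List.scanl_cons]
      simp only [List.getD_cons_succ, List.take_succ_cons, List.map_cons, List.sum_cons]
      rw [h]; ring

lemma pv_band_one (k : Nat) : PySem.Int.band (k : Int) 1 = ((k % 2 : Nat) : Int) := by
  have h1 : (1 : Int) = ((1 : Nat) : Int) := by norm_num
  rw [h1, PySem.Int.band_natCast, Nat.and_one_is_mod]

-- the taken prefix of the enumerate loop counts the parity matches below j
lemma pvB_prefixP (bits : List Int) (j : Nat) (hj : j ≤ bits.length) :
    (((PySem.List.enumerate bits 0).take j).map
      (fun kb => if kb.2 = PySem.Int.band kb.1 1 then (1 : Int) else 0)).sum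
    = ((List.range j).countP (pvP bits) : Int) := by
  have htake : (PySem.List.enumerate bits 0).take j
      = (List.range j).map (fun k : Nat => (((k : Int), PySem.List.pyGetD bits (k : Int) 0) : Int × Int)) := by
    rw [PySem.List.enumerate_eq_map_pyRange bits 0, PySem.List.len_eq,
        PySem.List.pyRange_zero_natCast, List.map_map, ← List.map_take, List.take_range,
        Nat.min_eq_left hj]
    rfl
  rw [htake, List.map_map]
  have hcong : (List.range j).map
      ((fun kb : Int × Int => if kb.2 = PySem.Int.band kb.1 1 then (1 : Int) else 0) ∘
        (fun k : Nat => (((k : Int), PySem.List.pyGetD bits (k : Int) 0) : Int × Int)))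
      = (List.range j).map (fun k : Nat => if pvP bits k then (1 : Int) else 0) := by
    apply List.map_congr_left
    intro k hk
    simp only [Function.comp_apply, pvP]
    rw [pv_band_one, PySem.List.pyGetD_natCast]
    simp
  rw [hcong]
  exact PySem.List.sum_map_ite_one_zero _ _

lemma pvB_prefixQ (bits : List Int) (j : Nat) (hj : j ≤ bits.length) :
    (((PySem.List.enumerate bits 0).take j).map
      (fun kb => if kb.2 = 1 - PySem.Int.band kb.1 1 then (1 : Int) else 0)).sum
    = ((List.range j).countP (pvQ bits) : Int) := by
  have htake : (PySem.List.enumerate bits 0).take j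
      = (List.range j).map (fun k : Nat => (((k : Int), PySem.List.pyGetD bits (k : Int) 0) : Int × Int)) := by
    rw [PySem.List.enumerate_eq_map_pyRange bits 0, PySem.List.len_eq,
        PySem.List.pyRange_zero_natCast, List.map_map, ← List.map_take, List.take_range,
        Nat.min_eq_left hj]
    rfl
  rw [htake, List.map_map]
  have hcong : (List.range j).map
      ((fun kb : Int × Int => if kb.2 = 1 - PySem.Int.band kb.1 1 then (1 : Int) else 0) ∘
        (fun k : Nat => (((k : Int), PySem.List.pyGetD bits (k : Int) 0) : Int × Int)))
      = (List.range j).map (fun k : Nat => if pvQ bits k then (1 : Int) else 0) := by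
    apply List.map_congr_left
    intro k hk
    simp only [Function.comp_apply, pvQ]
    rw [pv_band_one, PySem.List.pyGetD_natCast]
    simp
  rw [hcong]
  exact PySem.List.sum_map_ite_one_zero _ _

-- index j of B's p (resp. q) list is the match count below j
lemma pv_p_getD (bits : List Int) (j : Nat) (hj : j ≤ bits.length) :
    (List.scanl (fun a kb => a + (if kb.2 = PySem.Int.band kb.1 1 then (1 : Int) else 0)) 0
        (PySem.List.enumerate bits 0)).getD j 0
      = ((List.range j).countP (pvP bits) : Int) := by
  have hlen : j ≤ (PySem.List.enumerate bits 0).length := by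
    rw [PySem.List.length_enumerate]; exact hj
  rw [pv_scanl_getD _ _ 0 j hlen, zero_add]
  exact pvB_prefixP bits j hj

lemma pv_q_getD (bits : List Int) (j : Nat) (hj : j ≤ bits.length) :
    (List.scanl (fun a kb => a + (if kb.2 = 1 - PySem.Int.band kb.1 1 then (1 : Int) else 0)) 0
        (PySem.List.enumerate bits 0)).getD j 0
      = ((List.range j).countP (pvQ bits) : Int) := by
  have hlen : j ≤ (PySem.List.enumerate bits 0).length := by
    rw [PySem.List.length_enumerate]; exact hj
  rw [pv_scanl_getD _ _ 0 j hlen, zero_add]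
  exact pvB_prefixQ bits j hj

-- prefix-count difference is the window count
lemma pv_count_range_sub (h : Nat → Bool) (s : Nat) :
    ((List.range (s + 200)).countP h : Int) - ((List.range s).countP h : Int)
      = ((List.range 200).countP (fun i => h (s + i)) : Int) := by
  have hsplit : (List.range (s + 200)).countP h
      = (List.range s).countP h + (List.range 200).countP (fun i => h (s + i)) := by
    rw [List.range_add, List.countP_append, List.countP_map]; rfl
  rw [hsplit]; push_cast; ring

-- A's inner sums as window counts
lemma pvA_matchP (bits : List Int) (s : Nat) :
    ((PySem.List.pyRange 0 200 1).map
      (fun i => if PySem.List.pyGetD bits ((s : Int) + i) 0 = PySem.Int.band i 1 then (1 : Int) else 0)).sum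
    = ((List.range 200).countP (fun i => decide (bits.getD (s + i) 0 = ((i % 2 : Nat) : Int))) : Int) := by
  have h200 : (200 : Int) = ((200 : Nat) : Int) := by norm_num
  rw [h200, PySem.List.pyRange_zero_natCast, List.map_map]
  have hcong : (List.range 200).map
      ((fun i : Int => if PySem.List.pyGetD bits ((s : Int) + i) 0 = PySem.Int.band i 1 then (1 : Int) else 0) ∘
        (fun k : Nat => (k : Int)))
      = (List.range 200).map
        (fun k : Nat => if decide (bits.getD (s + k) 0 = ((k % 2 : Nat) : Int)) then (1 : Int) else 0) := by
    apply List.map_congr_left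
    intro k hk
    simp only [Function.comp_apply]
    have hidx : (s : Int) + (k : Int) = ((s + k : Nat) : Int) := by push_cast; ring
    rw [hidx, PySem.List.pyGetD_natCast, pv_band_one]
    simp
  rw [hcong]
  exact PySem.List.sum_map_ite_one_zero _ _

lemma pvA_matchQ (bits : List Int) (s : Nat) :
    ((PySem.List.pyRange 0 200 1).map
      (fun i => if PySem.List.pyGetD bits ((s : Int) + i) 0 = 1 - PySem.Int.band i 1 then (1 : Int) else 0)).sum
    = ((List.range 200).countP (fun i => decide (bits.getD (s + i) 0 = 1 - ((i % 2 : Nat) : Int))) : Int) := by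
  have h200 : (200 : Int) = ((200 : Nat) : Int) := by norm_num
  rw [h200, PySem.List.pyRange_zero_natCast, List.map_map]
  have hcong : (List.range 200).map
      ((fun i : Int => if PySem.List.pyGetD bits ((s : Int) + i) 0 = 1 - PySem.Int.band i 1 then (1 : Int) else 0) ∘
        (fun k : Nat => (k : Int)))
      = (List.range 200).map
        (fun k : Nat => if decide (bits.getD (s + k) 0 = 1 - ((k % 2 : Nat) : Int)) then (1 : Int) else 0) := by
    apply List.map_congr_left
    intro k hk
    simp only [Function.comp_apply]
    have hidx : (s : Int) + (k : Int) = ((s + k : Nat) : Int) := by push_cast; ring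
    rw [hidx, PySem.List.pyGetD_natCast, pv_band_one]
    simp
  rw [hcong]
  exact PySem.List.sum_map_ite_one_zero _ _

-- parity shifts between position parity and in-window parity
lemma pv_shift_even_p (bits : List Int) (s : Nat) (hs : s % 2 = 0) :
    (List.range 200).countP (fun i => pvP bits (s + i))
      = (List.range 200).countP (fun i => decide (bits.getD (s + i) 0 = ((i % 2 : Nat) : Int))) := by
  apply List.countP_congr
  intro i _
  simp only [pvP, decide_eq_true_eq]
  have hc : (((s + i) % 2 : Nat) : Int) = ((i % 2 : Nat) : Int) := by omega
  rw [hc]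

lemma pv_shift_even_q (bits : List Int) (s : Nat) (hs : s % 2 = 0) :
    (List.range 200).countP (fun i => pvQ bits (s + i))
      = (List.range 200).countP (fun i => decide (bits.getD (s + i) 0 = 1 - ((i % 2 : Nat) : Int))) := by
  apply List.countP_congr
  intro i _
  simp only [pvQ, decide_eq_true_eq]
  have hc : (((s + i) % 2 : Nat) : Int) = ((i % 2 : Nat) : Int) := by omega
  rw [hc]

lemma pv_shift_odd_p (bits : List Int) (s : Nat) (hs : s % 2 = 1) :
    (List.range 200).countP (fun i => pvP bits (s + i))
      = (List.range 200).countP (fun i => decide (bits.getD (s + i) 0 = 1 - ((i % 2 : Nat) : Int))) := by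
  apply List.countP_congr
  intro i _
  simp only [pvP, decide_eq_true_eq]
  have hc : (((s + i) % 2 : Nat) : Int) = 1 - ((i % 2 : Nat) : Int) := by omega
  rw [hc]

lemma pv_shift_odd_q (bits : List Int) (s : Nat) (hs : s % 2 = 1) :
    (List.range 200).countP (fun i => pvQ bits (s + i))
      = (List.range 200).countP (fun i => decide (bits.getD (s + i) 0 = ((i % 2 : Nat) : Int))) := by
  apply List.countP_congr
  intro i _
  simp only [pvQ, decide_eq_true_eq]
  have hc : (1 : Int) - (((s + i) % 2 : Nat) : Int) = ((i % 2 : Nat) : Int) := by omega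
  rw [hc]

-- ===== VERDICT (by name: the statement is the Claim_ definition above) =====
theorem find_dot_pattern_spec : Claim_equal_find_dot_pattern := by
  intro bits _
  show find_dot_pattern bits = find_dot_pattern_alt bits
  unfold find_dot_pattern find_dot_pattern_alt
  by_cases h : bits.length < 200
  · simp only [if_pos h]
  · simp only [if_neg h, pv_build_eq]
    refine congrArg (fun r : Int × Int => if r.2 ≥ 150 then r.1 else -1) ?_
    apply PySem.List.foldl_congr_mem
    intro acc start hmem
    obtain ⟨h0, hlt⟩ := PySem.List.mem_pyRange_one.mp hmem
    obtain ⟨s, rfl⟩ : ∃ s : Nat, start = (s : Int) := ⟨start.toNat, (Int.toNat_of_nonneg h0).symm⟩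
    have hsn : s + 200 ≤ bits.length := by
      have hlen : (s : Int) < (bits.length : Int) - 200 := hlt
      omega
    have hidx : ((s : Int)) + 200 = ((s + 200 : Nat) : Int) := by push_cast; ring
    rw [hidx]
    simp only [PySem.List.pyGetD_natCast]
    rw [pv_p_getD bits (s + 200) hsn, pv_p_getD bits s (by omega),
        pv_q_getD bits (s + 200) hsn, pv_q_getD bits s (by omega),
        pvA_matchP bits s, pvA_matchQ bits s]
    have hmod : PySem.Int.mod ((s : Nat) : Int) 2 = ((s % 2 : Nat) : Int) := by
      exact_mod_cast PySem.Int.mod_natCast s 2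
    rw [hmod]
    have hmax : ∀ a b : Int, (if a > b then a else b) = max a b := by
      intro a b
      rcases le_or_gt a b with h1 | h1
      · rw [if_neg (not_lt.mpr h1), max_eq_right h1]
      · rw [if_pos h1, max_eq_left h1.le]
    by_cases hpar : s % 2 = 0
    · have ht : (((s % 2 : Nat) : Int)) = 0 := by rw [hpar]; norm_num
      rw [if_pos ht, if_pos ht,
          pv_count_range_sub (pvP bits) s, pv_count_range_sub (pvQ bits) s,
          pv_shift_even_p bits s hpar, pv_shift_even_q bits s hpar, hmax]
    · have hs1 : s % 2 = 1 := by omega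
      have ht : ¬ ((((s % 2 : Nat) : Int)) = 0) := by rw [hs1]; norm_num
      rw [if_neg ht, if_neg ht,
          pv_count_range_sub (pvQ bits) s, pv_count_range_sub (pvP bits) s,
          pv_shift_odd_p bits s hs1, pv_shift_odd_q bits s hs1, hmax]
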